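-- pv_equiv track=rewrite | github.com/danesherbs/articulate-rules | utils.py | filter_subsets
-- ===== SOURCE A (Python) =====
-- from typing import (
--     Sequence,
--     TypeVar,
--     Collection,
--     Union,
--     Tuple,
--     Set,
--     Dict,
--     Generator,
--     Any,
--     Iterable,
-- )
--
-- T = TypeVar("T")  # declare type variable
--
-- def filter_subsets(collection: Collection[Collection[T]]) -> Tuple[Collection[T]]:
--     """Filters out any elements that are subsets of other elements."""
--     # pre-conditions
--     assert isinstance(collection, Collection), "Expected input to be a collection."
--     assert all(
--         isinstance(element, Collection) for element in collection
--     ), "Expected all elements to be collections."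
--
--     # body
--     new_collection = set()
--
--     for x in collection:
--         for y in collection:
--             if x == y:
--                 continue
--
--             if x in y:
--                 break
--         else:
--             new_collection.add(x)
--
--     new_collection = tuple(new_collection)
--
--     # post-conditions
--     assert isinstance(new_collection, tuple), "Expected output to be a set."
--     assert len(new_collection) <= len(
--         collection
--     ), "Expected new collection to be no bigger than the original."
--
--     return new_collection
-- ===== SOURCE B (Python) =====
-- def filter_subsets(collection):
--     """Filters out any elements that are subsets (substrings) of other elements."""
--     distinct = list(dict.fromkeys(collection))
--     proper = set()
--     for y in distinct:
--         n = len(y)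
--         for length in range(n):
--             for i in range(n - length + 1):
--                 proper.add(y[i:i+length])
--     return tuple(x for x in distinct if x not in proper)
-- ===== Notes on version B (the rewrite author's own statement) =====
-- stated objective: faster
-- what changed: B replaces A's pairwise for/else containment scan over the raw list by a substring index: it deduplicates first, one pass enumerates every strictly-shorter substring of each distinct string into a set, and each element is then kept by a single set-membership test instead of n substring searches.
import Mathlib
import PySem

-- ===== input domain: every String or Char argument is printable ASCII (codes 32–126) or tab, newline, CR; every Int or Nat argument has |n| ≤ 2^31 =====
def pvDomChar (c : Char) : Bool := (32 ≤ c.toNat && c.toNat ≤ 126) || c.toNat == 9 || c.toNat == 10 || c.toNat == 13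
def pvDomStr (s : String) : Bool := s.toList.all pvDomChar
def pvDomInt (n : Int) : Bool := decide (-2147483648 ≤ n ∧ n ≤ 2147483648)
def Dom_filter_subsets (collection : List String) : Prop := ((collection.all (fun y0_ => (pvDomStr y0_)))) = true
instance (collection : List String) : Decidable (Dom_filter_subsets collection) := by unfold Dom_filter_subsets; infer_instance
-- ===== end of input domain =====

-- B replaces A's pairwise containment scan by a substring index: it enumerates
-- every strictly-shorter substring of each distinct string into one set and keeps
-- x iff x is not in that set; return value only — A's Python returns a tuple in
-- arbitrary set order, compared as a set.

-- ===== PORT A =====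
-- inner 'for y in collection: … else: add' loop, with the for-else/break semantics
def pvInnerA (x : String) : List String → Bool
  | [] => true
  | y :: ys =>
    if x == y then pvInnerA x ys
    else if PySem.Str.isIn x y then false
    else pvInnerA x ys

def filter_subsets (collection : List String) : List String :=
  collection.foldl
    (fun s x => if pvInnerA x collection then PySem.Set.add s x else s)
    PySem.Set.empty

-- ===== PORT B =====
-- 'for length in range(n): for i in range(n - length + 1): proper.add(y[i:i+length])'
def pvSubstrAdd (s0 : PySem.Set String) (y : String) : PySem.Set String :=
  let n := PySem.Str.len y
  (PySem.List.pyRange 0 n 1).foldl (fun s1 len =>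
    (PySem.List.pyRange 0 (n - len + 1) 1).foldl (fun s2 i =>
      PySem.Set.add s2 (PySem.Str.slice y (some i) (some (i + len)))) s1) s0

def filter_subsets_alt (collection : List String) : List String :=
  let distinct := PySem.List.dedup collection
  let proper := distinct.foldl pvSubstrAdd PySem.Set.empty
  distinct.filter (fun x => !(PySem.Set.contains proper x))

-- ===== PRECONDITION & SPEC =====
def Spec_filter_subsets (collection : List String) (out : List String) : Prop := out = filter_subsets_alt collection
instance (collection : List String) (out : List String) : Decidable (Spec_filter_subsets collection out) := by unfold Spec_filter_subsets; infer_instance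

-- ===== CLAIM (what is proved, stated in full; the proofs are below) =====
def Claim_equal_filter_subsets : Prop := ∀ (collection : List String), Dom_filter_subsets collection → Spec_filter_subsets collection (filter_subsets collection)

-- ===== LEMMAS AND PROOFS =====

-- A's inner loop keeps x iff no distinct element of the list contains x
theorem pvInnerA_eq_true_iff (x : String) (c : List String) :
    pvInnerA x c = true ↔ ∀ y ∈ c, x = y ∨ PySem.Str.isIn x y = false := by
  induction c with
  | nil => simp [pvInnerA]
  | cons y ys ih =>
    have hdef : pvInnerA x (y :: ys) =
        if x == y then pvInnerA x ys
        else if PySem.Str.isIn x y then false else pvInnerA x ys := rfl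
    rw [hdef]
    by_cases hxy : x = y
    · subst hxy
      rw [if_pos (beq_self_eq_true x), ih]
      constructor
      · intro h z hz
        rcases List.mem_cons.mp hz with rfl | hz'
        · exact Or.inl rfl
        · exact h z hz'
      · intro h z hz
        exact h z (List.mem_cons_of_mem _ hz)
    · rw [if_neg (by simp [hxy])]
      by_cases hin : PySem.Str.isIn x y = true
      · rw [if_pos hin]
        constructor
        · intro h; exact absurd h (by simp)
        · intro h
          rcases h y (List.mem_cons_self) with h1 | h1
          · exact absurd h1 hxy
          · rw [hin] at h1; exact absurd h1 (by simp)
      · rw [if_neg hin, ih]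
        have hin' : PySem.Str.isIn x y = false := Bool.not_eq_true _ ▸ (by simpa using hin)
        constructor
        · intro h z hz
          rcases List.mem_cons.mp hz with rfl | hz'
          · exact Or.inr hin'
          · exact h z hz'
        · intro h z hz
          exact h z (List.mem_cons_of_mem _ hz)

-- a substring of a distinct string is strictly shorter
theorem pv_len_lt_of_isIn (x y : String) (hin : PySem.Str.isIn x y = true) (hne : x ≠ y) :
    x.toList.length < y.toList.length := by
  have hinf : x.toList <:+: y.toList := (PySem.Str.isIn_iff_infix x y).mp hin
  have hle : x.toList.length ≤ y.toList.length := hinf.length_le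
  rcases lt_or_eq_of_le hle with h | h
  · exact h
  · exact absurd (by
      have := hinf.eq_of_length h
      exact String.toList_inj.mp this) hne

-- membership in a fold whose step adds elements described by P
theorem pv_mem_foldl_step {α : Type} (f : PySem.Set String → α → PySem.Set String)
    (P : α → String → Prop)
    (h : ∀ (s : PySem.Set String) (a : α) (x : String), x ∈ f s a ↔ x ∈ s ∨ P a x)
    (l : List α) (s : PySem.Set String) (x : String) :
    x ∈ l.foldl f s ↔ x ∈ s ∨ ∃ a ∈ l, P a x := by
  induction l generalizing s with
  | nil => simp
  | cons a l ih =>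
    rw [List.foldl_cons, ih, h]
    constructor
    · rintro ((hs | hp) | ⟨b, hb, hpb⟩)
      · exact Or.inl hs
      · exact Or.inr ⟨a, List.mem_cons_self, hp⟩
      · exact Or.inr ⟨b, List.mem_cons_of_mem _ hb, hpb⟩
    · rintro (hs | ⟨b, hb, hpb⟩)
      · exact Or.inl (Or.inl hs)
      · rcases List.mem_cons.mp hb with rfl | hb'
        · exact Or.inl (Or.inr hpb)
        · exact Or.inr ⟨b, hb', hpb⟩

-- the enumerated slices of y are exactly its strictly-shorter infixes
theorem pv_slice_char (y x : String) :
    (∃ len, (0 ≤ len ∧ len < PySem.Str.len y) ∧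
      ∃ i, (0 ≤ i ∧ i < PySem.Str.len y - len + 1) ∧
        x = PySem.Str.slice y (some i) (some (i + len)))
    ↔ (x.toList <:+: y.toList ∧ x.toList.length < y.toList.length) := by
  rw [PySem.Str.len_eq]
  constructor
  · rintro ⟨len, ⟨hl0, hln⟩, i, ⟨hi0, hin⟩, hx⟩
    obtain ⟨m, rfl⟩ : ∃ m : ℕ, len = (m : ℤ) := ⟨len.toNat, (Int.toNat_of_nonneg hl0).symm⟩
    obtain ⟨j, rfl⟩ : ∃ j : ℕ, i = (j : ℤ) := ⟨i.toNat, (Int.toNat_of_nonneg hi0).symm⟩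
    have hxl : x.toList = (y.toList.drop j).take m := by
      rw [hx, PySem.Str.toList_slice, PySem.Chars.slice_eq_listSlice,
        PySem.List.slice_natCast_add]
    constructor
    · rw [hxl]
      exact ((y.toList.drop j).take_prefix m).isInfix.trans (y.toList.drop_suffix j).isInfix
    · rw [hxl]
      calc ((y.toList.drop j).take m).length ≤ m := by
            simpa using List.length_take_le m (y.toList.drop j)
        _ < y.toList.length := by exact_mod_cast hln
  · rintro ⟨hinf, hlt⟩
    obtain ⟨s, t, heq⟩ := hinf
    have hlen : s.length + x.toList.length + t.length = y.toList.length := by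
      rw [← heq]; simp; omega
    refine ⟨(x.toList.length : ℤ), ⟨by positivity, by exact_mod_cast hlt⟩,
      (s.length : ℤ), ⟨by positivity, by push_cast; omega⟩, ?_⟩
    apply String.toList_inj.mp
    rw [PySem.Str.toList_slice, PySem.Chars.slice_eq_listSlice,
      PySem.List.slice_natCast_add]
    rw [← heq, List.append_assoc, List.drop_left, List.take_left]

-- membership in the accumulated substring index
theorem pv_mem_substrAdd (y : String) (s : PySem.Set String) (x : String) :
    x ∈ pvSubstrAdd s y ↔
      x ∈ s ∨ (x.toList <:+: y.toList ∧ x.toList.length < y.toList.length) := by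
  unfold pvSubstrAdd
  rw [pv_mem_foldl_step
    (P := fun len x => ∃ i, (0 ≤ i ∧ i < PySem.Str.len y - len + 1) ∧
      x = PySem.Str.slice y (some i) (some (i + len)))
    (h := fun s1 len x => by
      rw [pv_mem_foldl_step
        (P := fun i x => x = PySem.Str.slice y (some i) (some (i + len)))
        (h := fun s2 i x => PySem.Set.mem_add s2 _ x)]
      simp [PySem.List.mem_pyRange_one])]
  rw [← pv_slice_char]
  simp [PySem.List.mem_pyRange_one]

-- the two keep-predicates agree pointwise
theorem pv_pred_eq (c : List String) (x : String) :
    pvInnerA x c =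
      !(PySem.Set.contains ((PySem.List.dedup c).foldl pvSubstrAdd PySem.Set.empty) x) := by
  have hmem : x ∈ (PySem.List.dedup c).foldl pvSubstrAdd PySem.Set.empty ↔
      ∃ y ∈ c, x.toList <:+: y.toList ∧ x.toList.length < y.toList.length := by
    rw [pv_mem_foldl_step
      (P := fun y x => x.toList <:+: y.toList ∧ x.toList.length < y.toList.length)
      (h := fun s y x => pv_mem_substrAdd y s x)]
    simp [PySem.Set.empty, PySem.List.mem_dedup]
  rw [Bool.eq_iff_iff, pvInnerA_eq_true_iff, Bool.not_eq_eq_eq_not, Bool.not_true,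
    ← Bool.not_eq_true, PySem.Set.contains_iff, hmem]
  constructor
  · intro h ⟨y, hy, hinf, hlt⟩
    rcases h y hy with h1 | h1
    · subst h1; omega
    · have h2 := (PySem.Str.isIn_iff_infix x y).mpr hinf
      rw [h1] at h2; exact Bool.false_ne_true h2
  · intro h y hy
    by_cases hin : PySem.Str.isIn x y = true
    · by_cases hxy : x = y
      · exact Or.inl hxy
      · exact absurd ⟨y, hy, (PySem.Str.isIn_iff_infix x y).mp hin,
          pv_len_lt_of_isIn x y hin hxy⟩ h
    · exact Or.inr (by simpa using hin)

-- conditional set-insertion loop = plain set-insertion loop over the filtered list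
theorem pv_foldl_if (p : String → Bool) (xs : List String) (s : PySem.Set String) :
    xs.foldl (fun s x => if p x then PySem.Set.add s x else s) s =
      (xs.filter p).foldl PySem.Set.add s := by
  induction xs generalizing s with
  | nil => rfl
  | cons x xs ih =>
    by_cases h : p x = true
    · simp [List.filter_cons, h, List.foldl_cons, ih]
    · simp only [Bool.not_eq_true] at h
      simp [List.filter_cons, h, List.foldl_cons, ih]

-- inserting a kept element commutes with filtering the set
theorem pv_add_filter_comm (p : String → Bool) (s : PySem.Set String) (x : String)
    (h : p x = true) :
    PySem.Set.add (s.filter p) x = (PySem.Set.add s x).filter p := by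
  by_cases hm : x ∈ s
  · have hc : PySem.Set.contains s x = true := (PySem.Set.contains_iff s x).mpr hm
    have hc2 : PySem.Set.contains (s.filter p) x = true :=
      (PySem.Set.contains_iff _ x).mpr (List.mem_filter.mpr ⟨hm, h⟩)
    simp only [PySem.Set.add, hc, hc2, if_true]
  · have hc : PySem.Set.contains s x = false := by
      rw [← Bool.not_eq_true, PySem.Set.contains_iff]; exact hm
    have hc2 : PySem.Set.contains (s.filter p) x = false := by
      rw [← Bool.not_eq_true, PySem.Set.contains_iff]
      intro hmem; exact hm (List.mem_filter.mp hmem).1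
    simp only [PySem.Set.add, hc, hc2, if_false, Bool.false_eq_true,
      List.filter_append]
    simp [h]

-- inserting a dropped element leaves the filtered set unchanged
theorem pv_add_filter_neg (p : String → Bool) (s : PySem.Set String) (x : String)
    (h : p x = false) :
    (PySem.Set.add s x).filter p = s.filter p := by
  by_cases hm : x ∈ s
  · have hc : PySem.Set.contains s x = true := (PySem.Set.contains_iff s x).mpr hm
    simp only [PySem.Set.add, hc, if_true]
  · have hc : PySem.Set.contains s x = false := by
      rw [← Bool.not_eq_true, PySem.Set.contains_iff]; exact hm
    simp only [PySem.Set.add, hc, if_false, Bool.false_eq_true, List.filter_append]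
    simp [h]

-- filtering commutes with set construction
theorem pv_ofList_filter (p : String → Bool) (xs : List String) :
    ∀ s : PySem.Set String,
      (xs.filter p).foldl PySem.Set.add (s.filter p) =
        (xs.foldl PySem.Set.add s).filter p := by
  induction xs with
  | nil => intro s; rfl
  | cons x xs ih =>
    intro s
    by_cases h : p x = true
    · rw [List.filter_cons_of_pos h, List.foldl_cons, List.foldl_cons,
        pv_add_filter_comm p s x h, ih (PySem.Set.add s x)]
    · simp only [Bool.not_eq_true] at h
      rw [List.filter_cons_of_neg (by simp [h]), List.foldl_cons,
        ← pv_add_filter_neg p s x h, ih (PySem.Set.add s x)]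

-- ===== VERDICT (by name: the statement is the Claim_ definition above) =====
theorem filter_subsets_spec : Claim_equal_filter_subsets := by
  intro c _
  show filter_subsets c = filter_subsets_alt c
  unfold filter_subsets filter_subsets_alt
  rw [pv_foldl_if]
  have h0 : (PySem.Set.empty : PySem.Set String) =
      (PySem.Set.empty : PySem.Set String).filter (fun x => pvInnerA x c) := rfl
  rw [h0, pv_ofList_filter]
  have hded : List.foldl PySem.Set.add (PySem.Set.empty : PySem.Set String) c =
      PySem.List.dedup c := by
    rw [PySem.List.dedup_eq_ofList, PySem.Set.ofList_eq_foldl]; rfl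
  rw [hded]
  exact List.filter_congr (fun x _ => pv_pred_eq c x)
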